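-- pv_equiv track=rewrite | github.com/thovy/- | 프로그래머스/lv1/131128. 숫자 짝꿍/숫자 짝꿍.py | solution
-- ===== SOURCE A (Python) =====
-- def solution(X, Y):
-- #     answer = ''
--
-- #     samelist = []
-- #     for i in range(len(X)):
--
-- #         if X[:len(X)-i-1] in Y and X[:len(X)-i-1] not in samelist:
-- #             samelist.append(X[:len(X)-i-1])
-- #             Y = Y.replace(X[:len(X)-i-1], '')
--
-- #     for i in range(len(X)):
-- #         if X[i:] in Y and X[i:] not in samelist:
-- #             samelist.append(X[i:])
-- #             Y = Y.replace(X[i:], '')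
--
-- #     for i in range(len(X)):
-- #         if X[i] in Y and X[i] not in samelist:
-- #             samelist.append(X[i])
-- #             Y = Y.replace(X[i],'')
--
-- # #         if X[i] in Y and X[i] not in samelist:
-- # #             samelist.append(X[i])
--
-- #     samelist = sorted(samelist, reverse=True)
-- #     if not samelist or samelist[0] == '':
-- #         return "-1"
-- #     elif samelist[0] == "0":
-- #         return "0"
-- #     else:
-- #         for s in samelist:
-- #             answer += s
--
-- #         return answer
--
--     x_count = {}
--     y_count = {}
--
--     # X와 Y의 숫자 등장 횟수를 계산합니다.
--     for digit in X:
--         x_count[digit] = x_count.get(digit, 0) + 1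
--     for digit in Y:
--         y_count[digit] = y_count.get(digit, 0) + 1
--
--     # 공통으로 나타나는 숫자를 찾습니다.
--     common_digits = set(x_count.keys()) & set(y_count.keys())
--
--     # 가장 큰 정수를 만듭니다.
--     result = []
--     for digit in sorted(common_digits, reverse=True):
--         count = min(x_count[digit], y_count[digit])  # 공통으로 나타나는 숫자의 최소 등장 횟수
--         result.extend([digit] * count)
--
--     # 만들어진 최대 정수를 문자열로 변환하여 반환합니다.
--     if not result:
--         return "-1"
--     elif result[0] == '0':
--         return '0'
--     return ''.join(result)
-- ===== SOURCE B (Python) =====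
-- def solution(X, Y):
--     xs = sorted(X, reverse=True)
--     ys = sorted(Y, reverse=True)
--     res = []
--     i = 0
--     j = 0
--     while i < len(xs) and j < len(ys):
--         a = xs[i]
--         b = ys[j]
--         if a == b:
--             res.append(a)
--             i += 1
--             j += 1
--         elif a > b:
--             i += 1
--         else:
--             j += 1
--     if not res:
--         return "-1"
--     if res[0] == '0':
--         return '0'
--     return ''.join(res)
-- ===== Notes on version B (the rewrite author's own statement) =====
-- stated objective: alternative
-- what changed: Replaced the two counting dicts + per-distinct-character replicate emission by sorting both strings descending and doing a two-pointer merge that collects the common multiset already in descending order.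
import Mathlib
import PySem

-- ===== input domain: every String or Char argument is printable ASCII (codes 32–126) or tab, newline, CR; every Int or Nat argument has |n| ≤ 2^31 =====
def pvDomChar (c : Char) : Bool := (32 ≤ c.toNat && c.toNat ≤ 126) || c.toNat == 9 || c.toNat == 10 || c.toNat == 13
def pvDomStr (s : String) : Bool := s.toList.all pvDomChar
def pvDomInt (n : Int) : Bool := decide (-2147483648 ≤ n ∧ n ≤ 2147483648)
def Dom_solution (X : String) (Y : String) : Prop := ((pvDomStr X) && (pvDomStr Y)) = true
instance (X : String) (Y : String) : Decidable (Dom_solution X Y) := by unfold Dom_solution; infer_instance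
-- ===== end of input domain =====

-- B replaces A's two counting dicts + per-distinct-digit replicate emission by sorting both
-- strings descending and a two-pointer merge (objective: alternative algorithm of similar cost).

-- ===== PORT A =====
-- counting loop 'for digit in S: d[digit] = d.get(digit, 0) + 1' (used twice in A)
def pvCounter (s : List Char) : PySem.Dict Char Int :=
  s.foldl (fun d digit => d.insert digit (d.getD digit 0 + 1)) PySem.Dict.empty

-- the list A names 'result' (common digits sorted descending, each repeated min count)
def pvResultA (X : String) (Y : String) : List Char :=
  let x_count := pvCounter X.toList
  let y_count := pvCounter Y.toList
  let common_digits := PySem.Set.inter (PySem.Set.ofList x_count.keys) (PySem.Set.ofList y_count.keys)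
  (PySem.List.sorted common_digits (fun x => x) true).foldl
    (fun acc digit =>
      acc ++ List.replicate (min (x_count.getD digit 0) (y_count.getD digit 0)).toNat digit) []

def solution (X : String) (Y : String) : String :=
  match pvResultA X Y with
  | [] => "-1"
  | c :: rest => if c = '0' then "0" else String.ofList (c :: rest)

-- ===== PORT B =====
-- the while loop of Source B: two pointers over the descending-sorted character lists
-- (fuel = combined length bounds the iteration count, only to make the recursion structural)
def pvMerge : Nat → List Char → List Char → List Char
  | 0, _, _ => []
  | _ + 1, [], _ => []
  | _ + 1, _ :: _, [] => []
  | n + 1, a :: as, b :: bs =>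
    if a = b then a :: pvMerge n as bs
    else if b < a then pvMerge n as (b :: bs)
    else pvMerge n (a :: as) bs

def pvResultB (X : String) (Y : String) : List Char :=
  let xs := PySem.List.sorted X.toList (fun c => c) true
  let ys := PySem.List.sorted Y.toList (fun c => c) true
  pvMerge (xs.length + ys.length) xs ys

def solution_alt (X : String) (Y : String) : String :=
  match pvResultB X Y with
  | [] => "-1"
  | c :: rest => if c = '0' then "0" else String.ofList (c :: rest)

-- ===== PRECONDITION & SPEC =====
def Spec_solution (X : String) (Y : String) (out : String) : Prop := out = solution_alt X Y
instance (X : String) (Y : String) (out : String) : Decidable (Spec_solution X Y out) := by unfold Spec_solution; infer_instance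

-- ===== CLAIM (what is proved, stated in full; the proofs are below) =====
def Claim_equal_solution : Prop := ∀ (X : String) (Y : String), Dom_solution X Y → Spec_solution X Y (solution X Y)

-- ===== LEMMAS AND PROOFS =====

-- A's counter loop counts occurrences
theorem pvCounter_getD_aux (s : List Char) (d : PySem.Dict Char Int) (c : Char) :
    (s.foldl (fun d digit => d.insert digit (d.getD digit 0 + 1)) d).getD c 0
      = d.getD c 0 + (s.count c : Int) := by
  induction s generalizing d with
  | nil => simp
  | cons a t ih =>
    simp only [List.foldl_cons, ih, PySem.Dict.getD_insert, List.count_cons]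
    by_cases h : c = a
    · simp [h]; ring
    · simp [h]; exact fun e => h e.symm

theorem pvCounter_getD (s : List Char) (c : Char) :
    (pvCounter s).getD c 0 = (s.count c : Int) := by
  have := pvCounter_getD_aux s PySem.Dict.empty c
  simpa [pvCounter, PySem.Dict.getD, PySem.Dict.empty, PySem.Dict.get?] using this

theorem pvCounter_keys (s : List Char) :
    (pvCounter s).keys = PySem.Set.ofList s := by
  rw [pvCounter, PySem.Dict.keys_foldl_insert]
  simp [PySem.Set.update, PySem.Set.ofList, PySem.Dict.empty, PySem.Dict.keys]

-- facts about B's merge loop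
theorem mem_pvMerge (n : Nat) (xs ys : List Char) (c : Char) (h : c ∈ pvMerge n xs ys) : c ∈ xs := by
  induction n generalizing xs ys with
  | zero => simp [pvMerge] at h
  | succ n ih =>
    match xs, ys with
    | [], _ => simp [pvMerge] at h
    | _ :: _, [] => simp [pvMerge] at h
    | a :: as, b :: bs =>
      simp only [pvMerge] at h
      split at h
      · rcases List.mem_cons.mp h with h | h
        · simp [h]
        · exact List.mem_cons_of_mem _ (ih _ _ h)
      · split at h
        · exact List.mem_cons_of_mem _ (ih _ _ h)
        · exact ih _ _ h

theorem pairwise_pvMerge (n : Nat) (xs ys : List Char)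
    (hx : xs.Pairwise (fun a b => b ≤ a)) (hy : ys.Pairwise (fun a b => b ≤ a)) :
    (pvMerge n xs ys).Pairwise (fun a b => b ≤ a) := by
  induction n generalizing xs ys with
  | zero => simp [pvMerge]
  | succ n ih =>
    match xs, ys with
    | [], _ => simp [pvMerge]
    | _ :: _, [] => simp [pvMerge]
    | a :: as, b :: bs =>
      rcases List.pairwise_cons.mp hx with ⟨ha, has⟩
      rcases List.pairwise_cons.mp hy with ⟨hb, hbs⟩
      simp only [pvMerge]
      split
      · refine List.pairwise_cons.mpr ⟨fun x hx' => ha x (mem_pvMerge n as bs x hx'), ih as bs has hbs⟩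
      · split
        · exact ih as (b :: bs) has hy
        · exact ih (a :: as) bs hx hbs

theorem not_mem_of_gt_head (b : Char) (bs : List Char) (a : Char)
    (hy : (b :: bs).Pairwise (fun u v => v ≤ u)) (hab : b < a) : a ∉ b :: bs := by
  rcases List.pairwise_cons.mp hy with ⟨hb, _⟩
  intro hmem
  rcases List.mem_cons.mp hmem with h | h
  · exact absurd h (ne_of_gt hab)
  · exact absurd (hb a h) (not_le.mpr hab)

theorem count_pvMerge (n : Nat) (xs ys : List Char) (c : Char) (hn : xs.length + ys.length ≤ n)
    (hx : xs.Pairwise (fun a b => b ≤ a)) (hy : ys.Pairwise (fun a b => b ≤ a)) :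
    (pvMerge n xs ys).count c = min (xs.count c) (ys.count c) := by
  induction n generalizing xs ys with
  | zero =>
    match xs, ys with
    | [], _ => simp [pvMerge]
    | _ :: _, _ => simp at hn
  | succ n ih =>
    match xs, ys with
    | [], _ => simp [pvMerge]
    | _ :: _, [] => simp [pvMerge]
    | a :: as, b :: bs =>
      rcases List.pairwise_cons.mp hx with ⟨ha, has⟩
      rcases List.pairwise_cons.mp hy with ⟨hb, hbs⟩
      simp only [pvMerge]
      split
      · rename_i hab
        subst hab
        simp only [List.count_cons, ih as bs (by simp at hn ⊢; omega) has hbs]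
        by_cases h : a = c
        · simp [h]
        · simp [h]
      · rename_i hab
        split
        · rename_i hba
          rw [ih as (b :: bs) (by simp at hn ⊢; omega) has hy]
          have hnot : a ∉ b :: bs := not_mem_of_gt_head b bs a hy hba
          by_cases h : a = c
          · subst h
            rw [List.count_eq_zero.mpr hnot]
            simp
          · simp [List.count_cons, h]
        · rename_i hba
          have hlt : a < b := lt_of_le_of_ne (not_lt.mp hba) hab
          rw [ih (a :: as) bs (by simp at hn ⊢; omega) hx hbs]
          have hnot : b ∉ a :: as := not_mem_of_gt_head a as b hx hlt
          by_cases h : b = c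
          · subst h
            rw [List.count_eq_zero.mpr hnot]
            simp
          · simp [List.count_cons, h]

-- shape of A's result: a flatMap of replicate blocks over the distinct common digits
theorem count_flatMap_replicate (n : Char → Nat) (ds : List Char) (hnd : ds.Nodup) (c : Char) :
    (ds.flatMap (fun d => List.replicate (n d) d)).count c = if c ∈ ds then n c else 0 := by
  induction ds with
  | nil => simp
  | cons a t ih =>
    rcases List.nodup_cons.mp hnd with ⟨hna, hnt⟩
    simp only [List.flatMap_cons, List.count_append, List.count_replicate, ih hnt, List.mem_cons]
    by_cases h : c = a
    · subst h
      simp [hna]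
    · simp [h]
      exact fun e => absurd e.symm h

theorem pairwise_flatMap_replicate (n : Char → Nat) (ds : List Char)
    (hp : ds.Pairwise (fun a b => b < a)) :
    (ds.flatMap (fun d => List.replicate (n d) d)).Pairwise (fun a b => b ≤ a) := by
  induction ds with
  | nil => simp
  | cons a t ih =>
    rcases List.pairwise_cons.mp hp with ⟨ha, ht⟩
    simp only [List.flatMap_cons]
    apply List.pairwise_append.mpr
    refine ⟨?_, ih ht, ?_⟩
    · apply List.pairwise_replicate.mpr
      simp
    · intro x hx y hy
      rcases List.eq_of_mem_replicate hx with rfl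
      rcases List.mem_flatMap.mp hy with ⟨d, hd, hyd⟩
      have hyd' := List.eq_of_mem_replicate hyd
      subst hyd'
      exact le_of_lt (ha _ hd)

-- the distinct-common-digit list A sorts, as an explicit expression
def pvDs (X Y : String) : List Char :=
  PySem.List.sorted
    (PySem.Set.inter (PySem.Set.ofList (pvCounter X.toList).keys)
                     (PySem.Set.ofList (pvCounter Y.toList).keys)) (fun x => x) true

theorem mem_pvDs (X Y : String) (c : Char) : c ∈ pvDs X Y ↔ c ∈ X.toList ∧ c ∈ Y.toList := by
  simp [pvDs, PySem.List.mem_sorted, PySem.Set.inter, List.mem_filter, PySem.Set.contains,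
    pvCounter_keys, PySem.Set.mem_ofList]

theorem nodup_pvDs (X Y : String) : (pvDs X Y).Nodup := by
  have h : (PySem.Set.inter (PySem.Set.ofList (pvCounter X.toList).keys)
      (PySem.Set.ofList (pvCounter Y.toList).keys)).Nodup :=
    List.Nodup.filter _ (PySem.Set.nodup_ofList _)
  unfold pvDs
  exact (PySem.List.sorted_perm _ _ _).symm.nodup h

theorem pairwise_pvDs (X Y : String) : (pvDs X Y).Pairwise (fun a b => b < a) := by
  have h1 := PySem.List.sorted_pairwise_rev
    (PySem.Set.inter (PySem.Set.ofList (pvCounter X.toList).keys)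
                     (PySem.Set.ofList (pvCounter Y.toList).keys)) (fun x : Char => x)
  have h2 := nodup_pvDs X Y
  have := List.Pairwise.and h1 (h2 : (pvDs X Y).Pairwise (· ≠ ·))
  exact this.imp (fun {a b} ⟨hle, hne⟩ => lt_of_le_of_ne hle (fun e => hne e.symm))

theorem pvResultA_eq_flatMap (X Y : String) :
    pvResultA X Y = (pvDs X Y).flatMap
      (fun d => List.replicate (min (X.toList.count d) (Y.toList.count d)) d) := by
  unfold pvResultA pvDs
  rw [PySem.List.foldl_append_eq_flatMap]
  simp only [List.nil_append]
  apply List.flatMap_congr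
  intro x hx
  rw [pvCounter_getD, pvCounter_getD]
  congr 1
  omega

theorem count_pvResultA (X Y : String) (c : Char) :
    (pvResultA X Y).count c = min (X.toList.count c) (Y.toList.count c) := by
  rw [pvResultA_eq_flatMap,
    count_flatMap_replicate (fun d => min (X.toList.count d) (Y.toList.count d)) _ (nodup_pvDs X Y)]
  by_cases h : c ∈ pvDs X Y
  · simp [h]
  · simp only [h, if_false]
    rcases not_and_or.mp ((mem_pvDs X Y c).not.mp h) with h' | h'
    · rw [List.count_eq_zero.mpr h']; omega
    · rw [List.count_eq_zero.mpr h']; omega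

theorem pairwise_pvResultA (X Y : String) :
    (pvResultA X Y).Pairwise (fun a b => b ≤ a) := by
  rw [pvResultA_eq_flatMap]
  exact pairwise_flatMap_replicate _ _ (pairwise_pvDs X Y)

theorem pvResultA_eq_pvResultB (X Y : String) : pvResultA X Y = pvResultB X Y := by
  have hx := PySem.List.sorted_pairwise_rev X.toList (fun c : Char => c)
  have hy := PySem.List.sorted_pairwise_rev Y.toList (fun c : Char => c)
  have hcount : ∀ c, (pvResultB X Y).count c
      = min (X.toList.count c) (Y.toList.count c) := by
    intro c
    unfold pvResultB
    rw [count_pvMerge _ _ _ c (le_refl _) hx hy,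
      (PySem.List.sorted_perm X.toList (fun c : Char => c) true).count_eq,
      (PySem.List.sorted_perm Y.toList (fun c : Char => c) true).count_eq]
  have hperm : (pvResultA X Y).Perm (pvResultB X Y) := by
    apply List.perm_iff_count.mpr
    intro a
    rw [count_pvResultA, hcount]
  have hpB : (pvResultB X Y).Pairwise (fun a b => b ≤ a) := pairwise_pvMerge _ _ _ hx hy
  exact List.Perm.eq_of_pairwise
    (fun a b _ _ h1 h2 => le_antisymm h2 h1)
    (pairwise_pvResultA X Y) hpB hperm

-- ===== VERDICT (by name: the statement is the Claim_ definition above) =====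
theorem solution_spec : Claim_equal_solution := by
  intro X Y _
  unfold Spec_solution solution solution_alt
  rw [pvResultA_eq_pvResultB]
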